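-- pv_equiv track=rewrite | github.com/valenb02/primer-repo | ejercicios_parcial.py | max_cantidad_primos
-- ===== SOURCE A (Python) =====
-- def es_primo(num: int) -> bool:
--     if num < 2:
--         return False
--     i : int = 2
--     while i < num:
--         if num % i == 0: #no necesito recorrer toda la lista, asi la condicion es exactamente lo que quiero
--             return False # y un falso DIRECTO si no se cumple
--         i += 1
--     return True
--
-- def max_cantidad_primos(A: list[list[int]]) -> int:
--     mayor_cant_primos : int = 0
--     contador_de_primos : int = 0
--     columnas : int = len((A[0]))
--     for j in range(columnas):
--         for i in range(len(A)):
--             if es_primo(A[i][j]):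
--                 contador_de_primos += 1
--         if contador_de_primos > mayor_cant_primos:
--             mayor_cant_primos = contador_de_primos
--         contador_de_primos = 0
--     return mayor_cant_primos
-- ===== SOURCE B (Python) =====
-- def es_primo(num: int) -> bool:
--     if num < 2:
--         return False
--     i : int = 2
--     while i < num:
--         if num % i == 0:
--             return False
--         i += 1
--     return True
--
-- def max_cantidad_primos(A: list[list[int]]) -> int:
--     columnas = len(A[0])
--     counts = [0] * columnas
--     for fila in A:
--         counts = [counts[j] + (1 if es_primo(fila[j]) else 0) for j in range(columnas)]
--     return max(counts, default=0)
-- ===== Notes on version B (the rewrite author's own statement) =====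
-- stated objective: alternative
-- what changed: Replaced A's column-major scan with a reset scalar counter folded into a running max by a row-major build-table-then-reduce: a per-column count vector is rebuilt per row and max(counts, default=0) is taken once at the end.
-- outside the precondition, e.g. on max_cantidad_primos([]): A raises IndexError, B raises IndexError
import Mathlib
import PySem

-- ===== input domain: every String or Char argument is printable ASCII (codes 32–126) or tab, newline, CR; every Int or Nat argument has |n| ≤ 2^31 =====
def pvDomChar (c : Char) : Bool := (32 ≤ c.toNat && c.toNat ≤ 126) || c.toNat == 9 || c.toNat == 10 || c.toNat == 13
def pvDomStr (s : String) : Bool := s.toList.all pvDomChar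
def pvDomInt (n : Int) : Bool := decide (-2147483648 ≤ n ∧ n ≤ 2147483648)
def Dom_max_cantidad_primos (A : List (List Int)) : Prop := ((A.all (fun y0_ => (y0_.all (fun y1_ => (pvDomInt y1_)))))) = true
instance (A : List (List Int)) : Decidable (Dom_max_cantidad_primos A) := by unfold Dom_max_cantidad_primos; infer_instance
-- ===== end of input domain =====

-- B rebuilds a per-column count vector row-major and takes one final max, instead of A's
-- column-major scan with a reset scalar counter folded into a running max (alternative decomposition).


-- ===== PORT A =====
-- shared helper: module-level es_primo, used verbatim by both A and B
def esPrimoLoop (num : Int) (i : Int) : Bool :=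
  if _h : i < num then
    if PySem.Int.mod num i == 0 then false
    else esPrimoLoop num (i + 1)
  else true
termination_by (num - i).toNat
decreasing_by omega

def esPrimo (num : Int) : Bool :=
  if num < 2 then false else esPrimoLoop num 2

def max_cantidad_primos (A : List (List Int)) : Int :=
  let columnas : Int := (PySem.List.pyGetD A 0 []).length
  let st := (PySem.List.pyRange 0 columnas 1).foldl
    (fun (st : Int × Int) j =>
      let cont := (PySem.List.pyRange 0 (A.length : Int) 1).foldl
        (fun c i => if esPrimo (PySem.List.pyGetD (PySem.List.pyGetD A i []) j 0) then c + 1 else c)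
        st.2
      (if cont > st.1 then cont else st.1, 0))
    ((0 : Int), (0 : Int))
  st.1

-- ===== PORT B =====
def max_cantidad_primos_alt (A : List (List Int)) : Int :=
  let columnas : Int := (PySem.List.pyGetD A 0 []).length
  let counts := A.foldl
    (fun (counts : List Int) fila =>
      (PySem.List.pyRange 0 columnas 1).map
        (fun j => PySem.List.pyGetD counts j 0 + if esPrimo (PySem.List.pyGetD fila j 0) then 1 else 0))
    (List.replicate columnas.toNat (0 : Int))
  (PySem.List.max? counts (fun x => x)).getD 0

-- ===== PRECONDITION & SPEC =====
-- Python A raises IndexError on A = [] (A[0]) and on jagged matrices where some row is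
-- shorter than the first row (A[i][j]); exactly those inputs are excluded.
def Pre_max_cantidad_primos (A : List (List Int)) : Prop :=
  A ≠ [] ∧ ∀ r ∈ A, A.headI.length ≤ r.length
instance (A : List (List Int)) : Decidable (Pre_max_cantidad_primos A) := by
  unfold Pre_max_cantidad_primos; infer_instance

def pvWitness_max_cantidad_primos : List (List Int) := [[2, 4], [3, 9], [7, 6]]

def Spec_max_cantidad_primos (A : List (List Int)) (out : Int) : Prop := out = max_cantidad_primos_alt A
instance (A : List (List Int)) (out : Int) : Decidable (Spec_max_cantidad_primos A out) := by
  unfold Spec_max_cantidad_primos; infer_instance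

-- ===== CLAIM (what is proved, stated in full; the proofs are below) =====
def Claim_equal_max_cantidad_primos : Prop := ∀ (A : List (List Int)), Dom_max_cantidad_primos A → Pre_max_cantidad_primos A → Spec_max_cantidad_primos A (max_cantidad_primos A)

-- ===== LEMMAS AND PROOFS =====

-- count of primes in column j (both programs' common quantity)
def colCnt (A : List (List Int)) (j : Int) : Int :=
  A.foldl (fun c fila => if esPrimo (PySem.List.pyGetD fila j 0) then c + 1 else c) 0

theorem colCnt_step_le (A : List (List Int)) (j : Int) (s : Int) :
    s ≤ A.foldl (fun c fila => if esPrimo (PySem.List.pyGetD fila j 0) then c + 1 else c) s := by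
  induction A generalizing s with
  | nil => simp
  | cons x t ih =>
    simp only [List.foldl_cons]
    split_ifs
    · exact le_trans (by omega) (ih (s + 1))
    · exact ih s

theorem colCnt_nonneg (A : List (List Int)) (j : Int) : 0 ≤ colCnt A j :=
  colCnt_step_le A j 0

-- A's outer loop computes a running max of column counts, with the counter reset to 0
theorem a_outer (A : List (List Int)) (js : List Int) (m : Int) :
    js.foldl
      (fun (st : Int × Int) j =>
        (if (PySem.List.pyRange 0 (A.length : Int) 1).foldl
              (fun c i => if esPrimo (PySem.List.pyGetD (PySem.List.pyGetD A i []) j 0) then c + 1 else c)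
              st.2 > st.1
         then (PySem.List.pyRange 0 (A.length : Int) 1).foldl
              (fun c i => if esPrimo (PySem.List.pyGetD (PySem.List.pyGetD A i []) j 0) then c + 1 else c)
              st.2
         else st.1, 0))
      (m, 0)
    = (js.foldl (fun m j => max m (colCnt A j)) m, 0) := by
  induction js generalizing m with
  | nil => rfl
  | cons j t ih =>
    rw [List.foldl_cons, List.foldl_cons]
    have hco : List.foldl
        (fun c i => if esPrimo (PySem.List.pyGetD (PySem.List.pyGetD A i []) j 0) then c + 1 else c)
        (0:Int) (PySem.List.pyRange 0 (A.length : Int) 1) = colCnt A j :=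
      PySem.List.foldl_pyRange_zero_pyGetD' A []
        (fun c fila => if esPrimo (PySem.List.pyGetD fila j 0) then c + 1 else c) 0
    have hif : (if (colCnt A j) > m then colCnt A j else m) = max m (colCnt A j) := by
      by_cases h : m < colCnt A j
      · rw [if_pos h, max_eq_right (le_of_lt h)]
      · rw [if_neg h, max_eq_left (not_lt.mp h)]
    simp only [hco, hif]
    exact ih (max m (colCnt A j))

-- B's row fold keeps counts = the per-column partial counts, as a map over the column range
theorem b_invariant (rows : List (List Int)) (c : Int) (g : Int → Int) :
    rows.foldl
      (fun (counts : List Int) fila =>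
        (PySem.List.pyRange 0 c 1).map
          (fun j => PySem.List.pyGetD counts j 0 + if esPrimo (PySem.List.pyGetD fila j 0) then 1 else 0))
      ((PySem.List.pyRange 0 c 1).map g)
    = (PySem.List.pyRange 0 c 1).map
        (fun j => rows.foldl (fun s fila => if esPrimo (PySem.List.pyGetD fila j 0) then s + 1 else s) (g j)) := by
  induction rows generalizing g with
  | nil => rfl
  | cons x t ih =>
    simp only [List.foldl_cons]
    have hstep : (PySem.List.pyRange 0 c 1).map
        (fun j => PySem.List.pyGetD ((PySem.List.pyRange 0 c 1).map g) j 0 +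
          if esPrimo (PySem.List.pyGetD x j 0) then 1 else 0)
      = (PySem.List.pyRange 0 c 1).map
          (fun j => if esPrimo (PySem.List.pyGetD x j 0) then g j + 1 else g j) := by
      apply List.map_congr_left
      intro j hj
      rw [PySem.List.mem_pyRange_one] at hj
      rw [PySem.List.pyGetD_map_pyRange_of_nonneg g c j 0 hj.1 hj.2]
      split_ifs <;> omega
    rw [hstep, ih]

theorem replicate_eq_map (c : Int) :
    List.replicate c.toNat (0 : Int) = (PySem.List.pyRange 0 c 1).map (fun _ => 0) := by
  rw [List.map_const']
  congr 1
  rw [PySem.List.length_pyRange_one]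
  omega

-- the final reduce: running max from 0 over a list of nonnegative values = max(list, default=0)
theorem final_max (A : List (List Int)) (c : Int) :
    (PySem.List.pyRange 0 c 1).foldl (fun m j => max m (colCnt A j)) 0
    = ((PySem.List.max? ((PySem.List.pyRange 0 c 1).map (fun j => colCnt A j)) (fun x => x)).getD 0) := by
  by_cases h : c ≤ 0
  · rw [PySem.List.pyRange_one_eq_nil h]; rfl
  · rw [PySem.List.pyRange_one_cons (by omega : (0:Int) < c)]
    simp only [List.map_cons, List.foldl_cons, PySem.List.max?_id_cons, Option.getD_some]
    rw [← List.foldl_map (f := fun j => colCnt A j) (g := max)]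
    congr 1
    exact max_eq_right (colCnt_nonneg A 0)

-- ===== VERDICT (by name: the statement is the Claim_ definition above) =====
theorem max_cantidad_primos_spec : Claim_equal_max_cantidad_primos := by
  intro A _ _
  unfold Spec_max_cantidad_primos max_cantidad_primos max_cantidad_primos_alt
  simp only []
  rw [a_outer A _ 0, replicate_eq_map, b_invariant]
  exact final_max A _
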